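-- pv_equiv track=rewrite | github.com/Mycodeko/godot_play_is_play_current_scene | utils/downgrade_to_godot_3.py | remove_array_types
-- ===== SOURCE A (Python) =====
-- from typing import List
--
-- def remove_array_types(line : str):
-- 	if 'Array' not in line:
-- 		return line
--
-- 	return_string_parts : List[str] = []
--
-- 	for part in line.split(' '):
-- 		output_part = part
-- 		if part.startswith('Array['):
-- 			output_part = ""
--
-- 			in_brackets = False
-- 			for character in part:
-- 				if in_brackets:
-- 					if character == ']':
-- 						in_brackets = False
-- 						continue
-- 				else:
-- 					if character == '[':
-- 						in_brackets = True
-- 						continue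
--
-- 				if not in_brackets:
-- 					output_part += character
--
-- 		return_string_parts.append(output_part)
--
-- 	return ' '.join(return_string_parts)
-- ===== SOURCE B (Python) =====
-- def remove_array_types(line):
-- 	if 'Array' not in line:
-- 		return line
--
-- 	parts = []
-- 	for part in line.split(' '):
-- 		if part.startswith('Array['):
-- 			# repeatedly splice out the first bracket group (an unclosed bracket drops the rest)
-- 			while True:
-- 				open_i = part.find('[')
-- 				if open_i == -1:
-- 					break
-- 				close_i = part.find(']', open_i)
-- 				if close_i == -1:
-- 					part = part[:open_i]
-- 				else:
-- 					part = part[:open_i] + part[close_i + 1:]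
-- 		parts.append(part)
-- 	return ' '.join(parts)
-- ===== Notes on version B (the rewrite author's own statement) =====
-- stated objective: simpler
-- what changed: Replaces A's per-character in_brackets state machine over each array-typed token by a loop that repeatedly locates the first opening bracket and the next closing bracket and splices that group out by string slicing.
import Mathlib
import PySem

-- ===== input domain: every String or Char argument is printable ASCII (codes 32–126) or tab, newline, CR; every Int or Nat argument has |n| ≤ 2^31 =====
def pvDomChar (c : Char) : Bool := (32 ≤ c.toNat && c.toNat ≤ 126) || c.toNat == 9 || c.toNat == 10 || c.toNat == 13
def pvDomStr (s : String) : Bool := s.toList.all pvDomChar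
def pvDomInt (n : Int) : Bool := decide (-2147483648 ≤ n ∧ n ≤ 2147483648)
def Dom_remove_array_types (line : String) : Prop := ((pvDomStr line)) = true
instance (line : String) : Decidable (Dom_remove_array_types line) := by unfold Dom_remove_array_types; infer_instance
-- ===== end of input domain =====

-- B replaces A's per-character in_brackets state machine by repeatedly splicing out the
-- first bracket group with find + slicing (objective: simpler).

-- ===== PORT A =====
-- A's inner character loop: state = (in_brackets, output_part chars), branches in A's order.
def pvStepA (st : Bool × List Char) (c : Char) : Bool × List Char :=
  if st.1 then
    (if c = ']' then (false, st.2) else st)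
  else
    (if c = '[' then (true, st.2) else (false, st.2 ++ [c]))

-- one iteration of A's outer loop: the value appended for one part
def pvOutputPartA (part : List Char) : List Char :=
  if PySem.Chars.startswith part "Array[".toList then
    (part.foldl pvStepA (false, [])).2
  else part

-- string ops ported on the list side (PySem.Chars) as PYSEM.md prescribes
def remove_array_types (line : String) : String :=
  if PySem.Str.isIn "Array" line = false then line
  else
    String.ofList (PySem.Chars.join [' ']
      ((PySem.Chars.splitOn line.toList [' ']).foldl
        (fun acc part => acc ++ [pvOutputPartA part]) []))

-- ===== PORT B =====
-- termination helper for pvStripB (cited in decreasing_by)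
lemma pvFindCharLt (l : List Char) (c : Char) (h : ¬ PySem.Chars.find l [c] = -1) :
    (PySem.Chars.find l [c]).toNat < l.length := by
  have h0 : 0 ≤ PySem.Chars.find l [c] := by
    have := PySem.Chars.neg_one_le_find l [c]; omega
  obtain ⟨hpre, -⟩ := PySem.Chars.find_spec h0
  rcases hpre with ⟨t, ht⟩
  by_contra hlen
  have : l.drop (PySem.Chars.find l [c]).toNat = [] := List.drop_eq_nil_of_le (by omega)
  simp [this] at ht

-- Source B's while loop: find '[', split off head/rest (part[:open_i] / part[open_i+1:] — nonnegative
-- slice bounds, exact as take/drop), find ']' in rest, splice and repeat.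
def pvStripB (part : List Char) : List Char :=
  let oi := PySem.Chars.find part ['[']
  if h : oi = -1 then part
  else
    let head := part.take oi.toNat
    let rest := part.drop (oi.toNat + 1)
    let ci := PySem.Chars.find rest [']']
    if h2 : ci = -1 then head
    else pvStripB (head ++ rest.drop (ci.toNat + 1))
termination_by part.length
decreasing_by
  have h1 := pvFindCharLt part '[' h
  have h3 := pvFindCharLt (part.drop ((PySem.Chars.find part ['[']).toNat + 1)) ']' h2
  simp only [List.length_append, List.length_take, List.length_drop] at *
  omega

def remove_array_types_alt (line : String) : String :=
  if PySem.Str.isIn "Array" line = false then line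
  else
    String.ofList (PySem.Chars.join [' ']
      ((PySem.Chars.splitOn line.toList [' ']).foldl
        (fun acc part =>
          acc ++ [if PySem.Chars.startswith part "Array[".toList then pvStripB part else part]) []))

-- ===== PRECONDITION & SPEC =====
def Spec_remove_array_types (line : String) (out : String) : Prop := out = remove_array_types_alt line
instance (line : String) (out : String) : Decidable (Spec_remove_array_types line out) := by unfold Spec_remove_array_types; infer_instance

-- ===== CLAIM (what is proved, stated in full; the proofs are below) =====
def Claim_equal_remove_array_types : Prop := ∀ (line : String), Dom_remove_array_types line → Spec_remove_array_types line (remove_array_types line)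

-- ===== LEMMAS AND PROOFS =====

-- find of a single character: miss means the character is absent
lemma pvFindCharNone (l : List Char) (c : Char) (h : PySem.Chars.find l [c] = -1) : c ∉ l := by
  intro hc
  rw [PySem.Chars.find_eq_neg_one_iff] at h
  rcases List.mem_iff_append.1 hc with ⟨s, t, rfl⟩
  exact h ⟨s, t, by simp⟩

-- find of a single character: hit decomposes the list at the FIRST occurrence
lemma pvFindCharSome (l : List Char) (c : Char) (h : ¬ PySem.Chars.find l [c] = -1) :
    l = l.take (PySem.Chars.find l [c]).toNat ++ c :: l.drop ((PySem.Chars.find l [c]).toNat + 1)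
      ∧ c ∉ l.take (PySem.Chars.find l [c]).toNat := by
  have h0 : 0 ≤ PySem.Chars.find l [c] := by
    have := PySem.Chars.neg_one_le_find l [c]; omega
  obtain ⟨hpre, hmin⟩ := PySem.Chars.find_spec h0
  set i := (PySem.Chars.find l [c]).toNat with hi
  have hlt : i < l.length := pvFindCharLt l c h
  have hdrop : l.drop i = l[i] :: l.drop (i + 1) := List.drop_eq_getElem_cons hlt
  have hgc : l[i] = c := by
    rcases hpre with ⟨t, ht⟩
    simp only [List.singleton_append] at ht
    rw [hdrop] at ht
    exact ((List.cons_eq_cons).mp ht).1.symm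
  constructor
  · conv_lhs => rw [← List.take_append_drop i l]
    rw [hdrop, hgc]
  · intro hc
    obtain ⟨j, hj, hje⟩ := List.getElem_of_mem hc
    have hjb : j < i ∧ j < l.length := by simpa using hj
    have hjlt : j < i := hjb.1
    have hjl : j < l.length := hjb.2
    apply hmin j hjlt
    have : l.drop j = l[j] :: l.drop (j + 1) := List.drop_eq_getElem_cons hjl
    rw [this]
    exact ⟨l.drop (j + 1), by simp [← hje, List.getElem_take]⟩

-- A's machine in state false over a '['-free block copies it verbatim
lemma pvFoldNoOpen (p : List Char) (acc : List Char) (h : '[' ∉ p) :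
    p.foldl pvStepA (false, acc) = (false, acc ++ p) := by
  induction p generalizing acc with
  | nil => simp
  | cons x xs ih =>
    have hx : x ≠ '[' := by intro hx; exact h (hx ▸ List.mem_cons_self)
    have hxs : '[' ∉ xs := fun hm => h (List.mem_cons_of_mem _ hm)
    simp [pvStepA, hx, ih _ hxs]

-- A's machine in state true over a ']'-free block drops it
lemma pvFoldSkip (q : List Char) (acc : List Char) (h : ']' ∉ q) :
    q.foldl pvStepA (true, acc) = (true, acc) := by
  induction q with
  | nil => rfl
  | cons x xs ih =>
    have hx : x ≠ ']' := by intro hx; exact h (hx ▸ List.mem_cons_self)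
    have hxs : ']' ∉ xs := fun hm => h (List.mem_cons_of_mem _ hm)
    simp [pvStepA, hx, ih hxs]

-- THE invariant: A's state machine computes exactly B's repeated first-pair splice
lemma pvMachineEqStrip (l : List Char) (acc : List Char) :
    (l.foldl pvStepA (false, acc)).2 = acc ++ pvStripB l := by
  generalize hn : l.length = n
  induction n using Nat.strong_induction_on generalizing l acc with
  | _ n ih =>
  subst hn
  rw [pvStripB]
  by_cases h : PySem.Chars.find l ['['] = -1
  · have := pvFindCharNone l '[' h
    simp [h, pvFoldNoOpen l acc this]
  · obtain ⟨hdec, hnl⟩ := pvFindCharSome l '[' h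
    set i := (PySem.Chars.find l ['[']).toNat with hi
    set rest := l.drop (i + 1) with hrest
    have hfold1 : l.foldl pvStepA (false, acc) = rest.foldl pvStepA (true, acc ++ l.take i) := by
      conv_lhs => rw [hdec]
      rw [List.foldl_append, pvFoldNoOpen _ _ hnl]
      simp [pvStepA]
    by_cases h2 : PySem.Chars.find rest [']'] = -1
    · have := pvFindCharNone rest ']' h2
      rw [hfold1, pvFoldSkip _ _ this]
      simp [h, h2]
    · obtain ⟨hdec2, hnr⟩ := pvFindCharSome rest ']' h2
      set j := (PySem.Chars.find rest [']']).toNat with hj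
      set s := rest.drop (j + 1) with hs
      have hfold2 : rest.foldl pvStepA (true, acc ++ l.take i) =
          s.foldl pvStepA (false, acc ++ l.take i) := by
        conv_lhs => rw [hdec2]
        rw [List.foldl_append, pvFoldSkip _ _ hnr]
        simp [pvStepA]
      have hfold3 : (l.take i ++ s).foldl pvStepA (false, acc) =
          s.foldl pvStepA (false, acc ++ l.take i) := by
        rw [List.foldl_append, pvFoldNoOpen _ _ hnl]
      have hlen : (l.take i ++ s).length < l.length := by
        have h1 : i < l.length := pvFindCharLt l '[' h
        have h3 : j < rest.length := pvFindCharLt rest ']' h2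
        simp only [List.length_append, List.length_take, hs, hrest, List.length_drop] at *
        omega
      have := ih _ hlen (l.take i ++ s) acc rfl
      rw [hfold1, hfold2, ← hfold3, this]
      simp only [h, h2, dif_neg, not_false_iff]
      rfl

-- per part, A's appended value equals B's
lemma pvPartEq (part : List Char) :
    pvOutputPartA part =
      (if PySem.Chars.startswith part "Array[".toList then pvStripB part else part) := by
  unfold pvOutputPartA
  by_cases h : PySem.Chars.startswith part "Array[".toList
  · rw [if_pos h, if_pos h]
    simpa using pvMachineEqStrip part []
  · rw [if_neg h, if_neg h]

-- ===== VERDICT (by name: the statement is the Claim_ definition above) =====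
theorem remove_array_types_spec : Claim_equal_remove_array_types := by
  intro line _
  unfold Spec_remove_array_types remove_array_types remove_array_types_alt
  by_cases h : PySem.Str.isIn "Array" line = false
  · rw [if_pos h, if_pos h]
  · rw [if_neg h, if_neg h]
    have hf : (fun (acc : List (List Char)) part => acc ++ [pvOutputPartA part])
        = (fun (acc : List (List Char)) part =>
            acc ++ [if PySem.Chars.startswith part "Array[".toList then pvStripB part else part]) := by
      funext acc part
      rw [pvPartEq part]
    rw [hf]
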